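-- pv_equiv track=rewrite | github.com/SkiSherpa/toy-problems | nishuProbs/easy/find_poison_dur.py | findPoisonedDuration
-- ===== SOURCE A (Python) =====
-- from typing import List
--
-- def findPoisonedDuration(timeSeries: List[int], duration: int) -> int:
--     if not timeSeries:
--         return 0
--
--     total_duration = 0
--
--     for i in range(len(timeSeries) - 1):
--         attack_time = timeSeries[i]
--         next_attack_time = timeSeries[i + 1]
--         # only when cur - next number is smaller than dur, you add it to tot.
--         total_duration += min(next_attack_time - attack_time, duration)
--
--     # Add duration for the last attack
--     total_duration += duration
--
--     return total_duration
-- ===== SOURCE B (Python) =====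
-- def findPoisonedDuration(timeSeries, duration):
--     # Divide and conquer: the poisoned time of a block of attacks is the
--     # poisoned time of its left half plus that of its right half, minus the
--     # overlap wasted at the junction between the two halves.
--     if not timeSeries:
--         return 0
--
--     def solve(lo, hi):
--         if hi - lo == 1:
--             return duration
--         mid = (lo + hi) // 2
--         return (solve(lo, mid) + solve(mid, hi)
--                 - max(0, duration - (timeSeries[mid] - timeSeries[mid - 1])))
--
--     return solve(0, len(timeSeries))
-- ===== Notes on version B (the rewrite author's own statement) =====
-- stated objective: alternative
-- what changed: B replaces A's single left-to-right index loop by a recursive divide-and-conquer over index ranges: a block's total is left half plus right half minus the overlap max(0, duration - junction gap) wasted where the halves meet.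
import Mathlib
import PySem

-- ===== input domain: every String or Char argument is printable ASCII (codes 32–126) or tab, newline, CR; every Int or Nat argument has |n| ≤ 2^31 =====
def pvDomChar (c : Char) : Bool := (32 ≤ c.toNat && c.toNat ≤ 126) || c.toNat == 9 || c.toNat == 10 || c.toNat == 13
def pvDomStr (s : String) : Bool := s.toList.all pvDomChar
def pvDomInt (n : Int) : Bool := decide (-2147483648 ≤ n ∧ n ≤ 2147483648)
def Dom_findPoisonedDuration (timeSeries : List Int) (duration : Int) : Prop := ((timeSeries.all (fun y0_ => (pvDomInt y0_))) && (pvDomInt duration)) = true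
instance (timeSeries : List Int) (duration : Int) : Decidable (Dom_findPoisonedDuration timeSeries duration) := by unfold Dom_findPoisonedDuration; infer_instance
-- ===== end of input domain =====

-- B replaces A's single index loop by a divide-and-conquer recursion over index
-- ranges (halves combined by subtracting the junction overlap): alternative
-- decomposition, same cost.

-- ===== PORT A =====
def findPoisonedDuration (timeSeries : List Int) (duration : Int) : Int :=
  if timeSeries = [] then 0
  else
    let total :=
      (PySem.List.pyRange 0 ((timeSeries.length : Int) - 1) 1).foldl
        (fun total_duration i =>
          let attack_time := PySem.List.pyGetD timeSeries i 0
          let next_attack_time := PySem.List.pyGetD timeSeries (i + 1) 0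
          total_duration + min (next_attack_time - attack_time) duration) 0
    total + duration

-- ===== PORT B =====
-- Python's inner 'solve(lo, hi)'; lo, hi are the nonnegative index bounds, so Nat.
-- Base case written 'hi ≤ lo + 1' (Python: 'hi - lo == 1'; callers only ever pass
-- hi - lo ≥ 1, where the two coincide).
def solveB (ts : List Int) (d : Int) (lo hi : Nat) : Int :=
  if hi ≤ lo + 1 then d
  else
    let mid := (lo + hi) / 2
    solveB ts d lo mid + solveB ts d mid hi
      - max 0 (d - (PySem.List.pyGetD ts (mid : Int) 0 - PySem.List.pyGetD ts ((mid : Int) - 1) 0))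
termination_by hi - lo
decreasing_by all_goals omega

def findPoisonedDuration_alt (timeSeries : List Int) (duration : Int) : Int :=
  if timeSeries = [] then 0
  else solveB timeSeries duration 0 timeSeries.length

-- ===== PRECONDITION & SPEC =====
def Spec_findPoisonedDuration (timeSeries : List Int) (duration : Int) (out : Int) : Prop := out = findPoisonedDuration_alt timeSeries duration
instance (timeSeries : List Int) (duration : Int) (out : Int) : Decidable (Spec_findPoisonedDuration timeSeries duration out) := by unfold Spec_findPoisonedDuration; infer_instance

-- ===== CLAIM (what is proved, stated in full; the proofs are below) =====
def Claim_equal_findPoisonedDuration : Prop := ∀ (timeSeries : List Int) (duration : Int), Dom_findPoisonedDuration timeSeries duration → Spec_findPoisonedDuration timeSeries duration (findPoisonedDuration timeSeries duration)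

-- ===== LEMMAS AND PROOFS =====

-- Overlap wasted at index i (gap between attacks i-1 and i).
def ov (ts : List Int) (d : Int) (i : Nat) : Int :=
  max 0 (d - (ts.getD i 0 - ts.getD (i - 1) 0))

-- A's loop in closed form: m * d minus the overlaps at indices 1..m.
theorem A_loop (ts : List Int) (d : Int) (m : Nat) :
    (List.range m).foldl
      (fun acc k => acc + min (ts.getD (k + 1) 0 - ts.getD k 0) d) 0
      = (m : Int) * d - ((List.range' 1 m).map (ov ts d)).sum := by
  induction m with
  | zero => simp
  | succ m ih =>
    rw [List.range_succ, List.range'_concat, List.foldl_append, List.map_append]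
    simp only [List.foldl_cons, List.foldl_nil, ih, List.map_cons, List.map_nil,
      List.sum_append, List.sum_cons, List.sum_nil]
    have : min (ts.getD (m + 1) 0 - ts.getD m 0) d = d - ov ts d (1 + m) := by
      have h2 : 1 + m = m + 1 := by omega
      simp [ov, h2]; omega
    rw [this]; simp only [one_mul]; push_cast; ring

-- solveB in the same closed form on any window lo < hi.
theorem solveB_eq (ts : List Int) (d : Int) :
    ∀ m lo hi, hi - lo = m → lo < hi →
      solveB ts d lo hi
        = ((hi - lo : Nat) : Int) * d - ((List.range' (lo + 1) (hi - lo - 1)).map (ov ts d)).sum := by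
  intro m
  induction m using Nat.strong_induction_on with
  | _ m ih =>
    intro lo hi hm hlt
    rw [solveB]
    by_cases hb : hi ≤ lo + 1
    · have : hi - lo = 1 := by omega
      simp [hb, this]
    · simp only [if_neg hb]
      set mid := (lo + hi) / 2 with hmid
      have h1 : lo < mid := by omega
      have h2 : mid < hi := by omega
      rw [ih (mid - lo) (by omega) lo mid rfl h1,
          ih (hi - mid) (by omega) mid hi rfl h2]
      have hj : max 0 (d - (PySem.List.pyGetD ts (mid : Int) 0 - PySem.List.pyGetD ts ((mid : Int) - 1) 0))
          = ov ts d mid := by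
        have e1 : ((mid : Int)) - 1 = ((mid - 1 : Nat) : Int) := by omega
        rw [e1, PySem.List.pyGetD_natCast, PySem.List.pyGetD_natCast]
        simp [ov]
      rw [hj]
      have e2 : List.range' mid (hi - mid) = mid :: List.range' (mid + 1) (hi - mid - 1) := by
        have h : hi - mid = (hi - mid - 1) + 1 := by omega
        rw [h, List.range'_succ]
        simp
      have hsplit : List.range' (lo + 1) (hi - lo - 1)
          = List.range' (lo + 1) (mid - lo - 1) ++ List.range' mid (hi - mid) := by
        have h := @List.range'_append (lo + 1) (mid - lo - 1) (hi - mid) 1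
        rw [show (lo + 1) + 1 * (mid - lo - 1) = mid from by omega] at h
        rw [h]
        congr 1
        omega
      rw [hsplit, e2, List.map_append, List.sum_append, List.map_cons, List.sum_cons]
      rw [Nat.cast_sub hlt.le, Nat.cast_sub h1.le, Nat.cast_sub h2.le]
      ring_nf

-- ===== VERDICT (by name: the statement is the Claim_ definition above) =====
theorem findPoisonedDuration_spec : Claim_equal_findPoisonedDuration := by
  intro ts d _
  unfold Spec_findPoisonedDuration findPoisonedDuration findPoisonedDuration_alt
  by_cases h : ts = []
  · simp [h]
  · simp only [if_neg h]
    have hn : 1 ≤ ts.length := List.length_pos_of_ne_nil h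
    rw [solveB_eq ts d ts.length 0 ts.length (by omega) (by omega)]
    rw [PySem.List.pyRange_one]
    rw [List.foldl_map]
    have hfun : (fun (acc : Int) (k : Nat) =>
          acc + min (PySem.List.pyGetD ts ((0 : Int) + ↑k + 1) 0
            - PySem.List.pyGetD ts ((0 : Int) + ↑k) 0) d)
        = (fun acc k => acc + min (ts.getD (k + 1) 0 - ts.getD k 0) d) := by
      funext acc k
      rw [show (0 : Int) + ↑k + 1 = ((k + 1 : Nat) : Int) from by push_cast; ring,
          show (0 : Int) + ↑k = ((k : Nat) : Int) from by ring,
          PySem.List.pyGetD_natCast, PySem.List.pyGetD_natCast]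
    rw [hfun]
    rw [show (((ts.length : Int) - 1 - 0)).toNat = ts.length - 1 from by omega]
    rw [A_loop]
    rw [show ts.length - 0 - 1 = ts.length - 1 from by omega,
        show 0 + 1 = 1 from rfl,
        Nat.cast_sub hn]
    push_cast
    ring_nf
    rw [Nat.sub_zero]
    ring
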